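-- pv_equiv track=rewrite | github.com/ElshadaiK/Competitive-Programming | div_by_25.py | solution
-- ===== SOURCE A (Python) =====
-- def solution(nums):
--     count = 0
--     if(int(nums)%25 == 0):
--         return count
--     else:
--         i = len(nums) -1
--         divs = {}
--         removal = 0
--         while i > -1:
--             if(nums[i] == '0'):
--                 if(0 in divs):
--                     removal -= 1
--                     return removal
--                 else:
--                     divs[0] = i
--                     removal += 1
--             elif(nums[i] == '5'):
--                 if(0 in divs):
--                     removal -= 1
--                     return removal
--                 else:
--                     divs[5] = i
--                     removal += 1
--             elif(nums[i] == '2'):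
--                 if(5 in divs):
--                     removal -= 1
--                     return removal
--                 else:
--                     removal += 1
--
--             elif(nums[i] == '7'):
--                 if(5 in divs):
--                     removal -= 1
--                     return removal
--                 else:
--                     removal += 1
--             else:
--                 removal += 1
--             i -= 1
-- ===== SOURCE B (Python) =====
-- def _cost(nums, tens, units):
--     # min removals to make nums end with tens+units, or None if impossible
--     u = nums.rfind(units)
--     if u <= 0:
--         return None
--     t = nums.rfind(tens, 0, u)
--     if t == -1:
--         return None
--     return (len(nums) - 1 - u) + (u - 1 - t)
--
--
-- def solution(nums):
--     if int(nums) % 25 == 0: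
--         return 0
--     best = None
--     for tens, units in ("00", "25", "50", "75"):
--         c = _cost(nums, tens, units)
--         if c is not None and (best is None or c < best):
--             best = c
--     return best
-- ===== Notes on version B (the rewrite author's own statement) =====
-- stated objective: idiomatic
-- what changed: Replaced A's stateful right-to-left scan with a dict of seen digits by a per-ending computation: for each of the four valid two-digit endings divisible by 25, find the rightmost units digit and the rightmost tens digit before it via str.rfind and return the minimum cost over the endings.
import Mathlib
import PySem

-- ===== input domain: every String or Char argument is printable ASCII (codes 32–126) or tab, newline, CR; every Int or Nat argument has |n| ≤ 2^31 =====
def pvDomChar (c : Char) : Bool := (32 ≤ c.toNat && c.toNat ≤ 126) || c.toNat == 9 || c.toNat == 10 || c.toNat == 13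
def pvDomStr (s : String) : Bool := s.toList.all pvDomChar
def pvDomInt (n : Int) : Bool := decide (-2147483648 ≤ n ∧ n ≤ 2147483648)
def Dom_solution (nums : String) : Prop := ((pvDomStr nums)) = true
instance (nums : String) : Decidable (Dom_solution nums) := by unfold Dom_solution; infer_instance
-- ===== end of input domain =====

-- B replaces A's stateful right-to-left scan (a dict of seen digits) by an idiomatic
-- per-ending computation: for each valid ending 00/25/50/75, rfind the units digit and the
-- tens digit before it, and take the minimum cost over the endings (same cost, different shape).


-- ===== PORT A =====
-- the while-loop of A: fuel m is i+1 (indices m-1 … 0 remain); every index read is in range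
def aLoop (s : List Char) : Nat → PySem.Dict Int Int → Int → Option Int
  | 0, _, _ => none
  | m+1, divs, removal =>
    if s.getD m ' ' = '0' then                          -- nums[i] with i = m (always in range)
      if divs.contains 0 then some (removal - 1)
      else aLoop s m (divs.insert 0 (m : Int)) (removal + 1)
    else if s.getD m ' ' = '5' then
      if divs.contains 0 then some (removal - 1)
      else aLoop s m (divs.insert 5 (m : Int)) (removal + 1)
    else if s.getD m ' ' = '2' then
      if divs.contains 5 then some (removal - 1)
      else aLoop s m divs (removal + 1)
    else if s.getD m ' ' = '7' then
      if divs.contains 5 then some (removal - 1)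
      else aLoop s m divs (removal + 1)
    else aLoop s m divs (removal + 1)

def solution (nums : String) : Option Int :=
  let count : Int := 0
  match PySem.Int.ofStr? nums with
  | none => none                                       -- int(nums) raises ValueError: outside Pre_solution
  | some v =>
    if PySem.Int.mod v 25 = 0 then some count
    else aLoop nums.toList nums.toList.length PySem.Dict.empty 0

-- ===== PORT B =====
-- nums.rfind(c, 0, m) for a single character c: rightmost index < m holding c, else -1 (exact)
def rfindChar (s : List Char) (c : Char) : Nat → Int
  | 0 => -1
  | m+1 => if s.getD m ' ' = c then ((m : Nat) : Int) else rfindChar s c m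

-- _cost(nums, tens, units) of Source B
def costEnding (s : List Char) (t u : Char) : Option Int :=
  let ui := rfindChar s u s.length
  if ui ≤ 0 then none
  else
    let ti := rfindChar s t ui.toNat
    if ti = -1 then none
    else some (((s.length : Int) - 1 - ui) + (ui - 1 - ti))

def solution_alt (nums : String) : Option Int :=
  match PySem.Int.ofStr? nums with
  | none => none
  | some v =>
    if PySem.Int.mod v 25 = 0 then some 0
    else
      [('0','0'), ('2','5'), ('5','0'), ('7','5')].foldl
        (fun best tu =>
          match costEnding nums.toList tu.1 tu.2 with
          | none => best
          | some c => match best with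
                      | none => some c
                      | some b => if c < b then some c else best)
        none

-- ===== PRECONDITION & SPEC =====
-- Pre_ excludes exactly the strings on which int(nums) raises ValueError (both programs raise there)
def Pre_solution (nums : String) : Prop := (PySem.Int.ofStr? nums).isSome = true
instance (nums : String) : Decidable (Pre_solution nums) := by unfold Pre_solution; infer_instance

def pvWitness_solution : String := "34"

def Spec_solution (nums : String) (out : Option Int) : Prop := out = solution_alt nums
instance (nums : String) (out : Option Int) : Decidable (Spec_solution nums out) := by unfold Spec_solution; infer_instance

-- ===== CLAIM (what is proved, stated in full; the proofs are below) =====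
def Claim_equal_solution : Prop := ∀ (nums : String), Dom_solution nums → Pre_solution nums → Spec_solution nums (solution nums)

-- ===== LEMMAS AND PROOFS =====

-- largest i < m with p i (the common characterisation both ports are reduced to)
def maxIdx (p : Nat → Bool) : Nat → Option Nat
  | 0 => none
  | m+1 => if p m then some m else maxIdx p m

def omaxN : Option Nat → Option Nat → Option Nat
  | none, b => b
  | some a, none => some a
  | some a, some b => some (max a b)

-- i is a tens index of some valid ending, with a matching units digit strictly to its right
def trigb (s : List Char) (i : Nat) : Bool :=
  ((decide (s.getD i ' ' = '0') || decide (s.getD i ' ' = '5')) && decide ('0' ∈ s.drop (i+1)))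
  || ((decide (s.getD i ' ' = '2') || decide (s.getD i ' ' = '7')) && decide ('5' ∈ s.drop (i+1)))

def endB (s : List Char) (t u : Char) (i : Nat) : Bool :=
  decide (s.getD i ' ' = t) && decide (u ∈ s.drop (i+1))

lemma maxIdx_lt {p : Nat → Bool} : ∀ {m k : Nat}, maxIdx p m = some k → k < m := by
  intro m
  induction m with
  | zero => intro k h; simp [maxIdx] at h
  | succ m ih =>
    intro k h
    by_cases hp : p m
    · simp [maxIdx, hp] at h; omega
    · simp [maxIdx, hp] at h; exact Nat.lt_succ_of_lt (ih h)

lemma maxIdx_none_iff {p : Nat → Bool} : ∀ {m : Nat}, maxIdx p m = none ↔ ∀ i, i < m → p i = false := by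
  intro m
  induction m with
  | zero => simp [maxIdx]
  | succ m ih =>
    by_cases hp : p m = true
    · constructor
      · intro h; rw [maxIdx] at h; simp [hp] at h
      · intro h; exact absurd (h m (Nat.lt_succ_self m)) (by simp [hp])
    · have hp' : p m = false := by simpa using hp
      simp only [maxIdx, hp', Bool.false_eq_true, if_false, ih]
      constructor
      · intro h i hi
        rcases Nat.lt_succ_iff_lt_or_eq.mp hi with h' | h'
        · exact h i h'
        · subst h'; exact hp'
      · intro h i hi; exact h i (by omega)

lemma maxIdx_spec {p : Nat → Bool} : ∀ {m k : Nat}, maxIdx p m = some k →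
    k < m ∧ p k = true ∧ ∀ i, k < i → i < m → p i = false := by
  intro m
  induction m with
  | zero => intro k h; simp [maxIdx] at h
  | succ m ih =>
    intro k h
    by_cases hp : p m
    · simp [maxIdx, hp] at h
      subst h
      exact ⟨by omega, hp, fun i h1 h2 => by omega⟩
    · simp [maxIdx, hp] at h
      obtain ⟨h1, h2, h3⟩ := ih h
      refine ⟨by omega, h2, fun i hi1 hi2 => ?_⟩
      rcases Nat.lt_succ_iff_lt_or_eq.mp hi2 with h' | h'
      · exact h3 i hi1 h'
      · subst h'; simpa using hp

lemma maxIdx_congr {p q : Nat → Bool} : ∀ {m : Nat}, (∀ i, i < m → p i = q i) →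
    maxIdx p m = maxIdx q m := by
  intro m
  induction m with
  | zero => intro _; rfl
  | succ m ih =>
    intro h
    have hm := h m (by omega)
    simp only [maxIdx, hm, ih (fun i hi => h i (by omega))]

lemma maxIdx_false_above {p : Nat → Bool} {k : Nat} : ∀ {m : Nat}, k ≤ m →
    (∀ i, k ≤ i → i < m → p i = false) → maxIdx p m = maxIdx p k := by
  intro m
  induction m with
  | zero => intro h _; have : k = 0 := by omega
            subst this; rfl
  | succ m ih =>
    intro hk h
    by_cases hke : k = m + 1
    · subst hke; rfl
    · have hkm : k ≤ m := by omega
      have hpm : p m = false := h m hkm (Nat.lt_succ_self m)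
      rw [maxIdx, hpm]
      simp only [Bool.false_eq_true, if_false]
      exact ih hkm (fun i h1 h2 => h i h1 (by omega))

lemma maxIdx_or {p q : Nat → Bool} : ∀ {m : Nat},
    maxIdx (fun i => p i || q i) m = omaxN (maxIdx p m) (maxIdx q m) := by
  intro m
  induction m with
  | zero => rfl
  | succ m ih =>
    by_cases hp : p m = true
    · simp only [maxIdx, hp, Bool.true_or, if_true]
      by_cases hq : q m = true
      · simp [omaxN, hq]
      · have hq' : q m = false := by simpa using hq
        simp only [hq', Bool.false_eq_true, if_false]
        cases hqq : maxIdx q m with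
        | none => rfl
        | some k =>
          have hlt := maxIdx_lt hqq
          simp [omaxN, Nat.max_eq_left (Nat.le_of_lt hlt)]
    · have hp' : p m = false := by simpa using hp
      by_cases hq : q m = true
      · simp only [maxIdx, hp', hq, Bool.false_or, if_true, Bool.false_eq_true, if_false]
        cases hpp : maxIdx p m with
        | none => rfl
        | some k =>
          have hlt := maxIdx_lt hpp
          simp [omaxN, Nat.max_eq_right (Nat.le_of_lt hlt)]
      · have hq' : q m = false := by simpa using hq
        simp only [maxIdx, hp', hq', Bool.false_or, Bool.false_eq_true, if_false, ih]

lemma mem_drop_iff {s : List Char} {u : Char} {d : Nat} :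
    u ∈ s.drop d ↔ ∃ j, d ≤ j ∧ ∃ h : j < s.length, s[j] = u := by
  rw [List.mem_iff_getElem]
  constructor
  · rintro ⟨k, hk, he⟩
    have hk' : d + k < s.length := by
      have := hk; rw [List.length_drop] at this; omega
    exact ⟨d + k, by omega, hk', by rw [← List.getElem_drop]; exact he⟩
  · rintro ⟨j, hj, hlt, he⟩
    have hk : j - d < (s.drop d).length := by rw [List.length_drop]; omega
    refine ⟨j - d, hk, ?_⟩
    rw [List.getElem_drop]
    have : d + (j - d) = j := by omega
    simp [this, he]

-- ========== A-side: the scan returns the first (largest) trigger index ==========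
lemma aLoop_eq (s : List Char) : ∀ (m : Nat), m ≤ s.length →
    ∀ (divs : PySem.Dict Int Int) (removal : Int),
    (divs.contains 0 = true ↔ '0' ∈ s.drop m) →
    (divs.contains 5 = true ↔ '5' ∈ s.drop m) →
    aLoop s m divs removal
      = (maxIdx (trigb s) m).map (fun (i : Nat) => removal + ((m : Int) - 1 - (i : Int)) - 1) := by
  intro m
  induction m with
  | zero => intro _ divs removal _ _; rfl
  | succ m ih =>
    intro hm divs removal h0 h5
    have hlt : m < s.length := by omega
    have hdrop : s.drop m = s[m] :: s.drop (m+1) := List.drop_eq_getElem_cons hlt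
    have hge : s[m]? = some s[m] := List.getElem?_eq_getElem hlt
    have hgetd : s.getD m ' ' = s[m] := List.getD_eq_getElem s ' ' hlt
    by_cases hc0 : s[m] = '0'
    · by_cases hz : '0' ∈ s.drop (m+1)
      · -- the ending 00 completes at i = m: the loop returns removal - 1
        have htr : trigb s m = true := by
          unfold trigb; rw [hgetd]; simp [hc0, hz]
        have hcont := h0.mpr hz
        have step : aLoop s (m+1) divs removal = some (removal - 1) := by
          simp [aLoop, hge, hc0, hcont]
        rw [step, show maxIdx (trigb s) (m+1) = some m from by simp [maxIdx, htr]]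
        simp only [Option.map_some, Option.some.injEq]
        push_cast; ring
      · -- record divs[0] = m and continue
        have hcont : divs.contains 0 = false := by
          cases hcb : divs.contains 0
          · rfl
          · exact absurd (h0.mp hcb) hz
        have htr : trigb s m = false := by
          unfold trigb; rw [hgetd]; simp [hc0, hz]
        have step : aLoop s (m+1) divs removal
            = aLoop s m (divs.insert 0 ((m : Nat) : Int)) (removal + 1) := by
          simp [aLoop, hge, hc0, hcont]
        have h0' : (divs.insert 0 ((m : Nat) : Int)).contains 0 = true ↔ '0' ∈ s.drop m := by
          simp [PySem.Dict.contains_insert, hdrop, hc0]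
        have h5' : (divs.insert 0 ((m : Nat) : Int)).contains 5 = true ↔ '5' ∈ s.drop m := by
          simp [PySem.Dict.contains_insert, hdrop, hc0, h5]
        rw [step, ih (by omega) _ _ h0' h5',
          show maxIdx (trigb s) (m+1) = maxIdx (trigb s) m from by simp [maxIdx, htr]]
        cases hmi : maxIdx (trigb s) m with
        | none => rfl
        | some k =>
          simp only [Option.map_some, Option.some.injEq]
          push_cast; ring
    · by_cases hc5 : s[m] = '5'
      · by_cases hz : '0' ∈ s.drop (m+1)
        · -- the ending 50 completes at i = m
          have htr : trigb s m = true := by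
            unfold trigb; rw [hgetd]; simp [hc5, hz]
          have hcont := h0.mpr hz
          have step : aLoop s (m+1) divs removal = some (removal - 1) := by
            simp [aLoop, hge, hc0, hc5, hcont]
          rw [step, show maxIdx (trigb s) (m+1) = some m from by simp [maxIdx, htr]]
          simp only [Option.map_some, Option.some.injEq]
          push_cast; ring
        · -- record divs[5] = m and continue
          have hcont : divs.contains 0 = false := by
            cases hcb : divs.contains 0
            · rfl
            · exact absurd (h0.mp hcb) hz
          have htr : trigb s m = false := by
            unfold trigb; rw [hgetd]; simp [hc5, hz]
          have step : aLoop s (m+1) divs removal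
              = aLoop s m (divs.insert 5 ((m : Nat) : Int)) (removal + 1) := by
            simp [aLoop, hge, hc0, hc5, hcont]
          have h0' : (divs.insert 5 ((m : Nat) : Int)).contains 0 = true ↔ '0' ∈ s.drop m := by
            simp [PySem.Dict.contains_insert, hdrop, hc5, h0, hz]
          have h5' : (divs.insert 5 ((m : Nat) : Int)).contains 5 = true ↔ '5' ∈ s.drop m := by
            simp [PySem.Dict.contains_insert, hdrop, hc5]
          rw [step, ih (by omega) _ _ h0' h5',
            show maxIdx (trigb s) (m+1) = maxIdx (trigb s) m from by simp [maxIdx, htr]]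
          cases hmi : maxIdx (trigb s) m with
          | none => rfl
          | some k =>
            simp only [Option.map_some, Option.some.injEq]
            push_cast; ring
      · -- s[m] is neither '0' nor '5': divs is unchanged in every remaining branch
        have hne0 : ¬ ('0' = s[m]) := fun h => hc0 h.symm
        have hne5 : ¬ ('5' = s[m]) := fun h => hc5 h.symm
        have h0'' : divs.contains 0 = true ↔ '0' ∈ s.drop m := by
          rw [hdrop, List.mem_cons, h0]
          simp [hne0]
        have h5'' : divs.contains 5 = true ↔ '5' ∈ s.drop m := by
          rw [hdrop, List.mem_cons, h5]
          simp [hne5]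
        by_cases hc2 : s[m] = '2'
        · by_cases hz : '5' ∈ s.drop (m+1)
          · -- the ending 25 completes at i = m
            have htr : trigb s m = true := by
              unfold trigb; rw [hgetd]; simp [hc2, hz]
            have hcont := h5.mpr hz
            have step : aLoop s (m+1) divs removal = some (removal - 1) := by
              simp [aLoop, hge, hc0, hc5, hc2, hcont]
            rw [step, show maxIdx (trigb s) (m+1) = some m from by simp [maxIdx, htr]]
            simp only [Option.map_some, Option.some.injEq]
            push_cast; ring
          · have hcont : divs.contains 5 = false := by
              cases hcb : divs.contains 5
              · rfl
              · exact absurd (h5.mp hcb) hz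
            have htr : trigb s m = false := by
              unfold trigb; rw [hgetd]; simp [hc0, hc5, hc2, hz]
            have step : aLoop s (m+1) divs removal = aLoop s m divs (removal + 1) := by
              simp [aLoop, hge, hc0, hc5, hc2, hcont]
            rw [step, ih (by omega) _ _ h0'' h5'',
              show maxIdx (trigb s) (m+1) = maxIdx (trigb s) m from by simp [maxIdx, htr]]
            cases hmi : maxIdx (trigb s) m with
            | none => rfl
            | some k =>
              simp only [Option.map_some, Option.some.injEq]
              push_cast; ring
        · by_cases hc7 : s[m] = '7'
          · by_cases hz : '5' ∈ s.drop (m+1)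
            · -- the ending 75 completes at i = m
              have htr : trigb s m = true := by
                unfold trigb; rw [hgetd]; simp [hc7, hz]
              have hcont := h5.mpr hz
              have step : aLoop s (m+1) divs removal = some (removal - 1) := by
                simp [aLoop, hge, hc0, hc5, hc2, hc7, hcont]
              rw [step, show maxIdx (trigb s) (m+1) = some m from by simp [maxIdx, htr]]
              simp only [Option.map_some, Option.some.injEq]
              push_cast; ring
            · have hcont : divs.contains 5 = false := by
                cases hcb : divs.contains 5
                · rfl
                · exact absurd (h5.mp hcb) hz
              have htr : trigb s m = false := by
                unfold trigb; rw [hgetd]; simp [hc0, hc5, hc2, hc7, hz]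
              have step : aLoop s (m+1) divs removal = aLoop s m divs (removal + 1) := by
                simp [aLoop, hge, hc0, hc5, hc2, hc7, hcont]
              rw [step, ih (by omega) _ _ h0'' h5'',
                show maxIdx (trigb s) (m+1) = maxIdx (trigb s) m from by simp [maxIdx, htr]]
              cases hmi : maxIdx (trigb s) m with
              | none => rfl
              | some k =>
                simp only [Option.map_some, Option.some.injEq]
                push_cast; ring
          · have htr : trigb s m = false := by
              unfold trigb; rw [hgetd]; simp [hc0, hc5, hc2, hc7]
            have step : aLoop s (m+1) divs removal = aLoop s m divs (removal + 1) := by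
              simp [aLoop, hge, hc0, hc5, hc2, hc7]
            rw [step, ih (by omega) _ _ h0'' h5'',
              show maxIdx (trigb s) (m+1) = maxIdx (trigb s) m from by simp [maxIdx, htr]]
            cases hmi : maxIdx (trigb s) m with
            | none => rfl
            | some k =>
              simp only [Option.map_some, Option.some.injEq]
              push_cast; ring

-- ========== B-side ==========
lemma rfindChar_eq (s : List Char) (c : Char) : ∀ (m : Nat),
    rfindChar s c m = (maxIdx (fun i => decide (s.getD i ' ' = c)) m).elim (-1) (fun k => (k : Int)) := by
  intro m
  induction m with
  | zero => rfl
  | succ m ih =>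
    by_cases hc : s.getD m ' ' = c
    · rw [show rfindChar s c (m+1) = ((m : Nat) : Int) from by
          simp only [rfindChar]; rw [if_pos hc],
        show maxIdx (fun i => decide (s.getD i ' ' = c)) (m+1) = some m from by
          simp only [maxIdx]; rw [if_pos (by simpa using hc)]]
      rfl
    · rw [show rfindChar s c (m+1) = rfindChar s c m from by
          simp only [rfindChar]; rw [if_neg hc],
        show maxIdx (fun i => decide (s.getD i ' ' = c)) (m+1)
            = maxIdx (fun i => decide (s.getD i ' ' = c)) m from by
          simp only [maxIdx]; rw [if_neg (by simpa using hc)],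
        ih]

lemma costEnding_eq (s : List Char) (t u : Char) :
    costEnding s t u
      = (maxIdx (endB s t u) s.length).map (fun (k : Nat) => (s.length : Int) - 2 - (k : Int)) := by
  cases hU : maxIdx (fun i => decide (s.getD i ' ' = u)) s.length with
  | none =>
    have hui : rfindChar s u s.length = -1 := by rw [rfindChar_eq, hU]; rfl
    have hM : maxIdx (endB s t u) s.length = none := by
      rw [maxIdx_none_iff]
      intro i hi
      simp only [endB, Bool.and_eq_false_iff]
      right
      simp only [decide_eq_false_iff_not]
      intro hmem
      obtain ⟨j, hj, hjl, hje⟩ := mem_drop_iff.mp hmem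
      have := (maxIdx_none_iff.mp hU) j hjl
      simp [List.getElem?_eq_getElem hjl, hje] at this
    rw [hM, Option.map_none]
    unfold costEnding
    simp only [hui]
    rfl
  | some k =>
    have hui : rfindChar s u s.length = (k : Int) := by rw [rfindChar_eq, hU]; rfl
    obtain ⟨hkl, hku, hkmax⟩ := maxIdx_spec hU
    have hsk : s[k] = u := by simpa [List.getElem?_eq_getElem hkl] using hku
    by_cases hk0 : k = 0
    · -- units digit only at index 0: no room for a tens digit
      subst hk0
      have hM : maxIdx (endB s t u) s.length = none := by
        rw [maxIdx_none_iff]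
        intro i hi
        simp only [endB, Bool.and_eq_false_iff]
        right
        simp only [decide_eq_false_iff_not]
        intro hmem
        obtain ⟨j, hj, hjl, hje⟩ := mem_drop_iff.mp hmem
        have := hkmax j (by omega) hjl
        simp [List.getElem?_eq_getElem hjl, hje] at this
      rw [hM, Option.map_none]
      unfold costEnding
      simp only [hui]
      rfl
    · have hkpos : 0 < k := by omega
      have hnle : ¬ ((k : Int) ≤ 0) := by omega
      have htoNat : ((k : Int)).toNat = k := by omega
      -- the valid tens indices are exactly the t-positions below k
      have hM : maxIdx (endB s t u) s.length
          = maxIdx (fun i => decide (s.getD i ' ' = t)) k := by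
        rw [maxIdx_false_above (Nat.le_of_lt hkl) (by
          intro i h1 h2
          simp only [endB, Bool.and_eq_false_iff]
          right
          simp only [decide_eq_false_iff_not]
          intro hmem
          obtain ⟨j, hj, hjl, hje⟩ := mem_drop_iff.mp hmem
          have := hkmax j (by omega) hjl
          simp [List.getElem?_eq_getElem hjl, hje] at this)]
        apply maxIdx_congr
        intro i hi
        have hmem : u ∈ s.drop (i+1) := mem_drop_iff.mpr ⟨k, by omega, hkl, hsk⟩
        simp [endB, hmem]
      rw [hM]
      cases hT : maxIdx (fun i => decide (s.getD i ' ' = t)) k with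
      | none =>
        have hti : rfindChar s t k = -1 := by rw [rfindChar_eq, hT]; rfl
        rw [Option.map_none]
        unfold costEnding
        simp only [hui, htoNat]
        rw [if_neg hnle, if_pos hti]
      | some j =>
        have hti : rfindChar s t k = (j : Int) := by rw [rfindChar_eq, hT]; rfl
        rw [Option.map_some]
        unfold costEnding
        simp only [hui, htoNat, hti]
        rw [if_neg hnle, if_neg (by omega : ¬ ((j : Int) = -1))]
        simp only [Option.some.injEq]
        omega

def ostep (best o : Option Int) : Option Int :=
  match o with
  | none => best
  | some c => match best with
              | none => some c
              | some b => if c < b then some c else best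

lemma ostep_map {n : Nat} (x y : Option Nat) :
    ostep (x.map (fun k : Nat => (n : Int) - 2 - (k : Int)))
          (y.map (fun k : Nat => (n : Int) - 2 - (k : Int)))
      = (omaxN x y).map (fun k : Nat => (n : Int) - 2 - (k : Int)) := by
  cases x with
  | none => cases y with
    | none => rfl
    | some b => rfl
  | some a => cases y with
    | none => rfl
    | some b =>
      simp only [Option.map_some, ostep, omaxN]
      rcases lt_trichotomy a b with h | h | h
      · rw [if_pos (by push_cast; omega)]
        congr 1; omega
      · subst h
        rw [if_neg (by omega)]
        congr 1; omega
      · rw [if_neg (by push_cast; omega)]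
        congr 1; omega

lemma trigb_eq_or (s : List Char) (i : Nat) :
    trigb s i = (((endB s '0' '0' i || endB s '2' '5' i) || endB s '5' '0' i) || endB s '7' '5' i) := by
  simp only [trigb, endB]
  rcases h0 : decide (s.getD i ' ' = '0') <;>
    rcases h2 : decide (s.getD i ' ' = '2') <;>
      rcases h5 : decide (s.getD i ' ' = '5') <;>
        rcases h7 : decide (s.getD i ' ' = '7') <;>
          rcases hz0 : decide ('0' ∈ s.drop (i+1)) <;>
            rcases hz5 : decide ('5' ∈ s.drop (i+1)) <;> rfl

lemma solution_alt_eq (s : List Char) :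
    ([('0','0'), ('2','5'), ('5','0'), ('7','5')].foldl
        (fun best tu =>
          match costEnding s tu.1 tu.2 with
          | none => best
          | some c => match best with
                      | none => some c
                      | some b => if c < b then some c else best)
        none)
      = (maxIdx (trigb s) s.length).map (fun (k : Nat) => (s.length : Int) - 2 - (k : Int)) := by
  have hfold : ([('0','0'), ('2','5'), ('5','0'), ('7','5')].foldl
        (fun best tu =>
          match costEnding s tu.1 tu.2 with
          | none => best
          | some c => match best with
                      | none => some c
                      | some b => if c < b then some c else best)
        none)
      = ostep (ostep (ostep (ostep none (costEnding s '0' '0')) (costEnding s '2' '5'))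
          (costEnding s '5' '0')) (costEnding s '7' '5') := rfl
  rw [hfold, costEnding_eq, costEnding_eq, costEnding_eq, costEnding_eq]
  rw [show (none : Option Int) = Option.map (fun k : Nat => (s.length : Int) - 2 - (k : Int)) none from rfl]
  rw [ostep_map, ostep_map, ostep_map, ostep_map]
  congr 1
  rw [show omaxN none (maxIdx (endB s '0' '0') s.length) = maxIdx (endB s '0' '0') s.length from rfl]
  rw [← maxIdx_or, ← maxIdx_or, ← maxIdx_or]
  exact (maxIdx_congr (fun i _ => trigb_eq_or s i)).symm

-- ===== VERDICT (by name: the statement is the Claim_ definition above) =====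
theorem solution_spec : Claim_equal_solution := by
  intro nums _ hpre
  unfold Spec_solution solution solution_alt
  cases hv : PySem.Int.ofStr? nums with
  | none => exact absurd (by simp [Pre_solution, hv] : ¬ Pre_solution nums) (fun h => h hpre)
  | some v =>
    dsimp only
    by_cases hm : PySem.Int.mod v 25 = 0
    · rw [if_pos hm, if_pos hm]
    · rw [if_neg hm, if_neg hm]
      rw [aLoop_eq nums.toList nums.toList.length (le_refl _) PySem.Dict.empty 0
        (by rw [List.drop_length]; simp [PySem.Dict.contains_empty])
        (by rw [List.drop_length]; simp [PySem.Dict.contains_empty])]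
      rw [solution_alt_eq]
      cases hmi : maxIdx (trigb nums.toList) nums.toList.length with
      | none => rfl
      | some k =>
        simp only [Option.map_some, Option.some.injEq]
        omega
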